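-- pv_equiv track=rewrite | github.com/FC-Li/CloudSimPy | playground/utils/feature_synthesize.py | father_task_indexs
-- ===== SOURCE A (Python) =====
-- def father_task_indexs(task_id, task_type):
-- 	father_indices = []
--
-- 	if (task_id.find('task_') != -1) :
-- 		task_index = task_type+'_'+'task_id'
-- 		return (task_index, father_indices)
--
-- 	numList = ['0', '1', '2', '3', '4', '5', '6', '7', '8', '9']
-- 	start_index = -1
--
-- 	for i, char_s in enumerate(task_id):
-- 		if (char_s in numList) and (start_index == -1):
-- 			start_index = i
-- 		if (char_s not in numList) and (start_index != -1):
-- 			father_indice = task_type + '_' + task_id[start_index: i]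
-- 			father_indices.append(father_indice)
-- 			start_index = -1
--
-- 	if (start_index != -1):
-- 		father_indice = task_type + '_' + task_id[start_index:]
-- 		father_indices.append(father_indice)
--
--
-- 	task_index = father_indices[0]
-- 	father_indices = father_indices[1:]
--
-- 	return (task_index, father_indices)
-- ===== SOURCE B (Python) =====
-- def father_task_indexs(task_id, task_type):
--     if task_id.find('task_') != -1:
--         return (task_type + '_' + 'task_id', [])
--     masked = ''.join(c if c.isdigit() else ' ' for c in task_id)
--     groups = [task_type + '_' + g for g in masked.split()]
--     return (groups[0], groups[1:])
-- ===== Notes on version B (the rewrite author's own statement) =====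
-- stated objective: simpler
-- what changed: A's single-pass start_index automaton with absolute-index slicing and a post-loop flush is replaced by staged passes: mask every non-digit character to a space, then let str.split() extract the maximal digit runs and prefix them in a comprehension.
import Mathlib
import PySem

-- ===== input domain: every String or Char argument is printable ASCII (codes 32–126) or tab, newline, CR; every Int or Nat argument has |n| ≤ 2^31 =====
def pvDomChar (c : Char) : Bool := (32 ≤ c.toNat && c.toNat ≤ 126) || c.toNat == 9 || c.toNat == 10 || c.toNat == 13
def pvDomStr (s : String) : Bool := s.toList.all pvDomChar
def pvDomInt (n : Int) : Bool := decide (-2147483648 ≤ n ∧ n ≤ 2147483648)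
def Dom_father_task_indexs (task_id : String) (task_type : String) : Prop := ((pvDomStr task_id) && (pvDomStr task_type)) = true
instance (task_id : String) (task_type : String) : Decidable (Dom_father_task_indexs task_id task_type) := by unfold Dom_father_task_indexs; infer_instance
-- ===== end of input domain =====

-- B replaces A's single-pass start_index automaton (absolute-index slicing, post-loop
-- flush) by staged passes: mask every non-digit character to a space, then str.split()
-- extracts the maximal digit runs, prefixed in a comprehension; objective: simpler.

-- ===== PORT A =====
-- loop body of A's 'for i, char_s in enumerate(task_id)' (p = (char_s, i); st = (father_indices, start_index))
def pvStepA (task_id : String) (task_type : String) (st : List String × Int) (p : Char × Nat) : List String × Int :=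
  let numList : List Char := ['0','1','2','3','4','5','6','7','8','9']
  let start_index : Int := if numList.contains p.1 && st.2 == -1 then (p.2 : Int) else st.2
  if !(numList.contains p.1) && start_index != -1 then
    (st.1 ++ [task_type ++ "_" ++ PySem.Str.slice task_id (some start_index) (some (p.2 : Int))], -1)
  else
    (st.1, start_index)

-- A's post-loop flush 'if start_index != -1: append task_id[start_index:]'
def pvFlushA (task_id : String) (task_type : String) (st : List String × Int) : List String :=
  if st.2 != -1 then
    st.1 ++ [task_type ++ "_" ++ PySem.Str.slice task_id (some st.2) none]
  else st.1

-- literal transliteration of A: early 'task_' guard, fold over enumerate(task_id),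
-- post-loop flush, then indexing [0] / [1:].
def father_task_indexs (task_id : String) (task_type : String) : String × List String :=
  if PySem.Str.find task_id "task_" ≠ -1 then
    (task_type ++ "_" ++ "task_id", [])
  else
    let st := task_id.toList.zipIdx.foldl (pvStepA task_id task_type) ([], -1)
    match pvFlushA task_id task_type st with
    | [] => ("", [])   -- Python raises IndexError here; excluded by Pre_
    | x :: rest => (x, rest)

-- ===== PORT B =====
-- transliteration of B: ''.join(c if c.isdigit() else ' ' for c in task_id), then
-- masked.split() (PySem.Str.split₀), then the prefixing comprehension and [0]/[1:].
def father_task_indexs_alt (task_id : String) (task_type : String) : String × List String :=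
  if PySem.Str.find task_id "task_" ≠ -1 then
    (task_type ++ "_" ++ "task_id", [])
  else
    let masked := String.ofList (task_id.toList.map (fun c => if PySem.Chars.isdigit c then c else ' '))
    let groups := (PySem.Str.split₀ masked).map (fun g => task_type ++ "_" ++ g)
    match groups with
    | [] => ("", [])   -- Python raises IndexError here; excluded by Pre_
    | x :: rest => (x, rest)

-- ===== PRECONDITION & SPEC =====
-- Pre_ excludes exactly the inputs where A raises IndexError (father_indices[0] on an
-- empty list): task_id contains neither the substring 'task_' nor any decimal digit.
def Pre_father_task_indexs (task_id : String) (task_type : String) : Prop :=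
  PySem.Str.find task_id "task_" ≠ -1 ∨ task_id.toList.any PySem.Chars.isdigit = true
instance (task_id : String) (task_type : String) : Decidable (Pre_father_task_indexs task_id task_type) := by unfold Pre_father_task_indexs; infer_instance
def pvWitness_father_task_indexs : String × String := ("j12_x7", "job")

def Spec_father_task_indexs (task_id : String) (task_type : String) (out : String × List String) : Prop := out = father_task_indexs_alt task_id task_type
instance (task_id : String) (task_type : String) (out : String × List String) : Decidable (Spec_father_task_indexs task_id task_type out) := by unfold Spec_father_task_indexs; infer_instance

-- ===== CLAIM (what is proved, stated in full; the proofs are below) =====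
def Claim_equal_father_task_indexs : Prop := ∀ (task_id : String) (task_type : String), Dom_father_task_indexs task_id task_type → Pre_father_task_indexs task_id task_type → Spec_father_task_indexs task_id task_type (father_task_indexs task_id task_type)

-- ===== LEMMAS AND PROOFS =====

set_option maxRecDepth 4000

-- the maximal digit runs of a character list (raw, unprefixed)
def pvRunsC : List Char → List (List Char)
  | [] => []
  | c :: cs =>
    if PySem.Chars.isdigit c then
      (c :: cs.takeWhile PySem.Chars.isdigit) :: pvRunsC (cs.dropWhile PySem.Chars.isdigit)
    else
      pvRunsC cs
termination_by cs => cs.length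
decreasing_by
  · simp; exact List.length_dropWhile_le _ _
  · simp

def pvMask (l : List Char) : List Char := l.map (fun c => if PySem.Chars.isdigit c then c else ' ')

theorem pv_contains_eq_isdigit (c : Char) :
    (['0','1','2','3','4','5','6','7','8','9'] : List Char).contains c = PySem.Chars.isdigit c := by
  show _ = (('0' ≤ c) && (c ≤ '9'))
  simp only [List.contains_cons, List.contains_nil, Bool.or_false]
  rcases c with ⟨⟨n, hn⟩, hv⟩
  simp [Char.le_def, Char.ext_iff, UInt32.le_iff_toNat_le, UInt32.ext_iff, BEq.beq]
  simp only [← Bool.decide_or, ← Bool.decide_and, decide_eq_decide]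
  omega

theorem pv_isspace_of_isdigit {c : Char} (h : PySem.Chars.isdigit c = true) :
    PySem.Chars.isspace c = false := by
  have h' : (('0' ≤ c) && (c ≤ '9')) = true := h
  simp only [Bool.and_eq_true, decide_eq_true_eq, Char.le_def, UInt32.le_iff_toNat_le] at h'
  unfold PySem.Chars.isspace
  simp only [Bool.or_eq_false_iff, Bool.and_eq_false_iff, decide_eq_false_iff_not]
  have h48 : 48 ≤ c.toNat := h'.1
  have h57 : c.toNat ≤ 57 := h'.2
  omega

theorem pv_str_eq_of_toList {s t : String} (h : s.toList = t.toList) : s = t := by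
  have := congrArg String.ofList h
  simpa using this

-- the split() automaton on a masked list produces exactly the digit runs
theorem pv_split_mask (n : Nat) : ∀ l : List Char, l.length = n →
    ((∀ acc : List (List Char), PySem.Chars.split₀.go (pvMask l) [] acc = acc.reverse ++ pvRunsC l)
    ∧ (∀ (p : List Char) (acc : List (List Char)), p ≠ [] →
        (∀ c ∈ p, PySem.Chars.isdigit c = true) →
        PySem.Chars.split₀.go (pvMask l) p.reverse acc =
          acc.reverse ++ (p ++ l.takeWhile PySem.Chars.isdigit) :: pvRunsC (l.dropWhile PySem.Chars.isdigit))) := by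
  induction n using Nat.strong_induction_on with
  | _ n IH =>
    intro l hlen
    constructor
    · intro acc
      cases l with
      | nil => simp [pvMask, PySem.Chars.split₀.go, pvRunsC]
      | cons c l' =>
        simp only [List.length_cons] at hlen
        by_cases hd : PySem.Chars.isdigit c = true
        · have : pvMask (c :: l') = c :: pvMask l' := by simp [pvMask, hd]
          rw [this, PySem.Chars.split₀.go, pv_isspace_of_isdigit hd]
          have h2 := (IH l'.length (by omega) l' rfl).2 [c] acc (by simp) (by simpa using hd)
          simp only [List.reverse_singleton] at h2
          simp only [Bool.false_eq_true, if_false]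
          rw [show [c] = ([c] : List Char).reverse by simp] at *
          rw [h2]
          simp [pvRunsC, hd]
        · have : pvMask (c :: l') = ' ' :: pvMask l' := by simp [pvMask, hd]
          rw [this, PySem.Chars.split₀.go]
          have hsp : PySem.Chars.isspace ' ' = true := by decide
          rw [hsp]
          simp only [if_true, List.isEmpty_nil]
          rw [(IH l'.length (by omega) l' rfl).1 acc]
          simp [pvRunsC, hd]
    · intro p acc hpne hpdig
      cases l with
      | nil =>
        have hpe : p.reverse.isEmpty = false := by
          cases p with | nil => exact absurd rfl hpne | cons a b => simp
        simp [pvMask, PySem.Chars.split₀.go, hpe, pvRunsC]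
      | cons c l' =>
        simp only [List.length_cons] at hlen
        by_cases hd : PySem.Chars.isdigit c = true
        · have : pvMask (c :: l') = c :: pvMask l' := by simp [pvMask, hd]
          rw [this, PySem.Chars.split₀.go, pv_isspace_of_isdigit hd]
          simp only [Bool.false_eq_true, if_false]
          have h2 := (IH l'.length (by omega) l' rfl).2 (p ++ [c]) acc (by simp)
            (by intro x hx; rcases List.mem_append.1 hx with h | h
                · exact hpdig x h
                · simpa [List.mem_singleton.1 h] using hd)
          rw [show c :: p.reverse = (p ++ [c]).reverse by simp] at *
          rw [h2]
          simp [hd]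
        · have : pvMask (c :: l') = ' ' :: pvMask l' := by simp [pvMask, hd]
          rw [this, PySem.Chars.split₀.go]
          have hsp : PySem.Chars.isspace ' ' = true := by decide
          have hpe : p.reverse.isEmpty = false := by
            cases p with | nil => exact absurd rfl hpne | cons a b => simp
          rw [hsp]
          simp only [if_true, hpe, Bool.false_eq_true, if_false, List.reverse_reverse]
          rw [(IH l'.length (by omega) l' rfl).1 (p :: acc)]
          simp [pvRunsC, hd]

theorem pv_tail_drop {tid : String} {k : Nat} {c : Char} {l : List Char}
    (h : tid.toList.drop k = c :: l) : tid.toList.drop (k + 1) = l := by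
  have := congrArg List.tail h
  simpa [List.tail_drop] using this

-- joint loop invariant for A's automaton: clean state (start_index = -1) and
-- in-run state (start_index = s with pending digit run p); the result is the
-- prefixed digit runs.
theorem pv_main (tid tt : String) : ∀ n : Nat, ∀ l : List Char, l.length = n →
    ((∀ (k : Nat) (acc : List String), tid.toList.drop k = l →
        pvFlushA tid tt (List.foldl (pvStepA tid tt) (acc, -1) (l.zipIdx k)) =
          acc ++ (pvRunsC l).map (fun g => tt ++ "_" ++ String.ofList g))
    ∧ (∀ (s : Nat) (p : List Char) (acc : List String), p ≠ [] →
        (∀ c ∈ p, PySem.Chars.isdigit c = true) → tid.toList.drop s = p ++ l →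
        tid.toList.drop (s + p.length) = l →
        pvFlushA tid tt (List.foldl (pvStepA tid tt) (acc, ((s : Nat) : Int)) (l.zipIdx (s + p.length))) =
          acc ++ (tt ++ "_" ++ String.ofList (p ++ l.takeWhile PySem.Chars.isdigit))
            :: (pvRunsC (l.dropWhile PySem.Chars.isdigit)).map (fun g => tt ++ "_" ++ String.ofList g))) := by
  intro n
  induction n using Nat.strong_induction_on with
  | _ n IH =>
    intro l hlen
    constructor
    · intro k acc hdrop
      cases l with
      | nil =>
        simp [pvFlushA, pvRunsC]
      | cons c l' =>
        simp only [List.length_cons] at hlen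
        have hc := pv_contains_eq_isdigit c
        by_cases hd : PySem.Chars.isdigit c = true
        · -- digit: start run at k, continue in in-run state with p = [c]
          have hstep : pvStepA tid tt (acc, -1) (c, k) = (acc, (k : Int)) := by
            simp only [pvStepA]
            rw [hc]
            simp [hd]
          rw [List.zipIdx_cons, List.foldl_cons, hstep]
          have h2 := (IH l'.length (by omega) l' rfl).2 k [c] acc (by simp) (by simpa using hd)
            (by simpa using hdrop) (by simp; exact pv_tail_drop hdrop)
          simp only [List.length_cons, List.length_nil, Nat.zero_add] at h2
          rw [h2]
          simp [pvRunsC, hd]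
        · -- non-digit: state unchanged
          have hstep : pvStepA tid tt (acc, -1) (c, k) = (acc, -1) := by
            simp only [pvStepA]
            rw [hc]
            simp [hd]
          rw [List.zipIdx_cons, List.foldl_cons, hstep]
          rw [(IH l'.length (by omega) l' rfl).1 (k+1) acc (pv_tail_drop hdrop)]
          simp [pvRunsC, hd]
    · intro s p acc hpne hpdig hdrop hdrop1
      cases l with
      | nil =>
        have hsl : PySem.Str.slice tid (some ((s:Nat):Int)) none = String.ofList p := by
          apply pv_str_eq_of_toList
          simp [PySem.List.slice_from_natCast]
          simpa using hdrop
        have hne : ¬(((s:Nat):Int) = -1) := by omega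
        simp [pvFlushA, pvRunsC, hne, hsl]
      | cons c l' =>
        simp only [List.length_cons] at hlen
        have hc := pv_contains_eq_isdigit c
        have hs_ne : (((s:Nat):Int) == -1) = false := by simp
        by_cases hd : PySem.Chars.isdigit c = true
        · -- digit: extend the pending run
          have hstep : pvStepA tid tt (acc, ((s:Nat):Int)) (c, s + p.length) = (acc, ((s:Nat):Int)) := by
            simp only [pvStepA]
            rw [hc]
            simp [hd, hs_ne]
          rw [List.zipIdx_cons, List.foldl_cons, hstep]
          have h2 := (IH l'.length (by omega) l' rfl).2 s (p ++ [c]) acc (by simp)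
            (by intro x hx; rcases List.mem_append.1 hx with h | h
                · exact hpdig x h
                · simpa [List.mem_singleton.1 h] using hd)
            (by simpa using hdrop)
            (by simp at *; exact pv_tail_drop hdrop1)
          have harith : s + p.length + 1 = s + (p ++ [c]).length := by simp [Nat.add_assoc]
          rw [harith, h2]
          simp [hd]
        · -- non-digit at index s + p.length: emit slice tid[s : s+p.length] = p, back to clean state
          have hl : PySem.List.slice tid.toList (some ((s:Nat):Int)) (some (((s:Nat):Int) + ((p.length:Nat):Int))) = p := by
            rw [PySem.List.slice_natCast_add, hdrop]
            simpa using List.take_left p (c :: l')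
          have hsl : PySem.Str.slice tid (some ((s:Nat):Int)) (some (((s:Nat):Int) + ((p.length:Nat):Int))) = String.ofList p := by
            apply pv_str_eq_of_toList
            simp [hl]
          have hstep : pvStepA tid tt (acc, ((s:Nat):Int)) (c, s + p.length) =
              (acc ++ [tt ++ "_" ++ String.ofList p], -1) := by
            simp only [pvStepA]
            rw [hc]
            simp [hd, hs_ne, hsl]
          rw [List.zipIdx_cons, List.foldl_cons, hstep]
          rw [(IH l'.length (by omega) l' rfl).1 (s + p.length + 1) _ (pv_tail_drop hdrop1)]
          simp [pvRunsC, hd]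

theorem father_task_indexs_spec : Claim_equal_father_task_indexs := by
  intro task_id task_type _ _
  unfold Spec_father_task_indexs father_task_indexs father_task_indexs_alt
  by_cases hf : PySem.Str.find task_id "task_" ≠ -1
  · rw [if_pos hf, if_pos hf]
  · rw [if_neg hf, if_neg hf]
    have hA := (pv_main task_id task_type task_id.toList.length task_id.toList rfl).1 0 []
      (by simp)
    have hB : (PySem.Str.split₀ (String.ofList (task_id.toList.map
          (fun c => if PySem.Chars.isdigit c then c else ' ')))).map
            (fun g => task_type ++ "_" ++ g) =
        (pvRunsC task_id.toList).map (fun g => task_type ++ "_" ++ String.ofList g) := by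
      show ((PySem.Chars.split₀ _).map String.ofList).map _ = _
      rw [List.map_map]
      have hm : (String.ofList (task_id.toList.map
          (fun c => if PySem.Chars.isdigit c then c else ' '))).toList = pvMask task_id.toList := by
        simp [pvMask]
      show ((PySem.Chars.split₀.go (String.ofList _).toList [] []).map _) = _
      rw [hm, (pv_split_mask task_id.toList.length task_id.toList rfl).1 []]
      simp
    show (match pvFlushA task_id task_type (List.foldl (pvStepA task_id task_type) ([], -1) task_id.toList.zipIdx) with
      | [] => (("" : String), ([] : List String))
      | x :: rest => (x, rest)) = _
    rw [hA, List.nil_append, ← hB]
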